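-- pv_equiv track=rewrite | github.com/fioreMelodie/estructuras_de_datos | algorithms_review/model/modelo.py | isDigitIncreasing
-- ===== SOURCE A (Python) =====
-- def isDigitIncreasing(numero: int) -> int:
--     for n in range(1, 10):
--         suma = 0
--         termino = 0
--         while suma < numero:
--             termino = termino * 10 + n
--             suma += termino
--             if suma == numero:
--                 return 1
--     return 0
-- ===== SOURCE B (Python) =====
-- def isDigitIncreasing(numero: int) -> int:
--     termino = 1
--     base = 1
--     while base <= numero:
--         if numero % base == 0 and 1 <= numero // base <= 9:
--             return 1
--         termino = termino * 10 + 1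
--         base += termino
--     return 0
-- ===== Notes on version B (the rewrite author's own statement) =====
-- stated objective: faster
-- what changed: Replaces the double loop over the nine digits (each re-summing the series) by a single loop over the accumulated repdigit-series sums built by repunit accumulation, testing divisibility with a single-digit quotient.
import Mathlib
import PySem

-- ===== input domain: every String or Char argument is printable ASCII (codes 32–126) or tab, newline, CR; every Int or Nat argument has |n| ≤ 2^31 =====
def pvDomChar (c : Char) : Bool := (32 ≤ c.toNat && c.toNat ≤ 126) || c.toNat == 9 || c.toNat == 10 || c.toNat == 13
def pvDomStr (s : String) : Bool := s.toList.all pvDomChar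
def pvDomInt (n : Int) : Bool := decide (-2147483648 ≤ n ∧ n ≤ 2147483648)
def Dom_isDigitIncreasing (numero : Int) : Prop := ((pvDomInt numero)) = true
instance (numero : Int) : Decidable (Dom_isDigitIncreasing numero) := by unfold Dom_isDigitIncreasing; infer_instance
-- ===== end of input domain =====

-- B replaces A's double loop over the nine digits by a single loop over the accumulated
-- repdigit-series sums with a divisibility/quotient test (constant-factor change).


-- ===== PORT A =====
-- A's inner while loop; fuel only makes the recursion total (numero.toNat + 1 steps
-- always suffice, since suma grows by at least 1 per iteration — proved below).
def pvAInner (numero n : Int) : Nat → Int → Int → Option Int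
  | 0, _, _ => none
  | fuel + 1, suma, termino =>
    if suma < numero then
      let t := termino * 10 + n
      let s := suma + t
      if s = numero then some 1 else pvAInner numero n fuel s t
    else none

-- A's outer for-loop over range(1, 10)
def pvAOuter (numero : Int) : List Int → Int
  | [] => 0
  | n :: rest =>
    match pvAInner numero n (numero.toNat + 1) 0 0 with
    | some r => r
    | none => pvAOuter numero rest

def isDigitIncreasing (numero : Int) : Int :=
  pvAOuter numero (PySem.List.pyRange 1 10 1)

-- ===== PORT B =====
-- B's single while loop; same fuel note as above.
def pvBLoop (numero : Int) : Nat → Int → Int → Int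
  | 0, _, _ => 0
  | fuel + 1, termino, base =>
    if base ≤ numero then
      if PySem.Int.mod numero base = 0 ∧ 1 ≤ PySem.Int.floordiv numero base ∧
          PySem.Int.floordiv numero base ≤ 9 then 1
      else
        let t := termino * 10 + 1
        pvBLoop numero fuel t (base + t)
    else 0

def isDigitIncreasing_alt (numero : Int) : Int :=
  pvBLoop numero (numero.toNat + 1) 1 1

-- ===== PRECONDITION & SPEC =====
def Spec_isDigitIncreasing (numero : Int) (out : Int) : Prop := out = isDigitIncreasing_alt numero
instance (numero : Int) (out : Int) : Decidable (Spec_isDigitIncreasing numero out) := by unfold Spec_isDigitIncreasing; infer_instance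

-- ===== CLAIM (what is proved, stated in full; the proofs are below) =====
def Claim_equal_isDigitIncreasing : Prop := ∀ (numero : Int), Dom_isDigitIncreasing numero → Spec_isDigitIncreasing numero (isDigitIncreasing numero)

-- ===== LEMMAS AND PROOFS =====

-- repunit 1, 11, 111, … and the series sums 1, 12, 123, …
def pvRep : Nat → Int
  | 0 => 0
  | j + 1 => pvRep j * 10 + 1

def pvBas : Nat → Int
  | 0 => 0
  | j + 1 => pvBas j + pvRep (j + 1)

lemma pvRep_nonneg (j : Nat) : 0 ≤ pvRep j := by
  induction j with
  | zero => simp [pvRep]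
  | succ j ih => simp only [pvRep]; omega

lemma pvBas_lt_succ (j : Nat) : pvBas j < pvBas (j + 1) := by
  have := pvRep_nonneg j
  simp only [pvBas, pvRep]; omega

lemma pvBas_strictMono : StrictMono pvBas :=
  strictMono_nat_of_lt_succ pvBas_lt_succ

lemma pvBas_pos (j : Nat) (hj : 1 ≤ j) : 1 ≤ pvBas j := by
  have h0 : pvBas 0 < pvBas j := pvBas_strictMono (by omega)
  simp [pvBas] at h0; omega

-- The shared characterisation predicate
def pvHit (numero : Int) : Prop :=
  ∃ k, 1 ≤ k ∧ ∃ n : Int, 1 ≤ n ∧ n ≤ 9 ∧ n * pvBas k = numero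

lemma pvAInner_characterize (numero n : Int) (hn : 1 ≤ n) :
    ∀ (fuel j : Nat), numero ≤ n * pvBas j + fuel →
      (pvAInner numero n fuel (n * pvBas j) (n * pvRep j) = some 1 ↔
        ∃ k, j < k ∧ n * pvBas k = numero) := by
  intro fuel
  induction fuel with
  | zero =>
    intro j hf
    simp only [pvAInner]
    constructor
    · intro h; exact absurd h (by simp)
    · rintro ⟨k, hk, hke⟩
      have hb : pvBas j < pvBas k := pvBas_strictMono hk
      have : n * pvBas j < n * pvBas k := by
        exact mul_lt_mul_of_pos_left hb (by omega)
      omega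
  | succ fuel ih =>
    intro j hf
    by_cases hc : n * pvBas j < numero
    · have ht : n * pvRep j * 10 + n = n * pvRep (j + 1) := by
        simp only [pvRep]; ring
      have hs : n * pvBas j + (n * pvRep j * 10 + n) = n * pvBas (j + 1) := by
        simp only [pvBas, pvRep]; ring
      by_cases he : n * pvBas (j + 1) = numero
      · simp only [pvAInner, if_pos hc]
        rw [hs, if_pos he]
        simp only [true_iff]
        exact ⟨j + 1, by omega, he⟩
      · have hrep1 : 1 ≤ pvRep (j + 1) := by have := pvRep_nonneg j; simp only [pvRep]; omega
        have hstep : n * pvBas j + n ≤ n * pvBas (j + 1) := by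
          have : n * 1 ≤ n * pvRep (j + 1) := by
            exact mul_le_mul_of_nonneg_left hrep1 (by omega)
          simp only [pvBas]; nlinarith
        have hf' : numero ≤ n * pvBas (j + 1) + fuel := by omega
        have := ih (j + 1) hf'
        simp only [pvAInner, if_pos hc]
        rw [hs, if_neg he, ht, this]
        constructor
        · rintro ⟨k, hk, hke⟩; exact ⟨k, by omega, hke⟩
        · rintro ⟨k, hk, hke⟩
          refine ⟨k, ?_, hke⟩
          rcases Nat.lt_or_ge (j+1) k with h | h
          · exact h
          · have hkj : k = j + 1 := by omega
            subst hkj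
            exact absurd hke he
    · simp only [pvAInner, if_neg hc]
      constructor
      · intro h; exact absurd h (by simp)
      · rintro ⟨k, hk, hke⟩
        have hb : pvBas j < pvBas k := pvBas_strictMono hk
        have : n * pvBas j < n * pvBas k := mul_lt_mul_of_pos_left hb (by omega)
        omega

lemma pvAInner_start (numero n : Int) (hn : 1 ≤ n) :
    (pvAInner numero n (numero.toNat + 1) 0 0 = some 1 ↔
      ∃ k, 0 < k ∧ n * pvBas k = numero) := by
  have h0 : n * pvBas 0 = 0 := by simp [pvBas]
  have h0' : n * pvRep 0 = 0 := by simp [pvRep]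
  have := pvAInner_characterize numero n hn (numero.toNat + 1) 0 (by rw [h0]; omega)
  rw [h0, h0'] at this
  exact this

lemma pvAInner_cases (numero n : Int) :
    ∀ (fuel : Nat) (s t : Int),
      pvAInner numero n fuel s t = some 1 ∨ pvAInner numero n fuel s t = none := by
  intro fuel
  induction fuel with
  | zero => intro s t; right; rfl
  | succ fuel ih =>
    intro s t
    simp only [pvAInner]
    split_ifs with h1 h2
    · left; rfl
    · exact ih _ _
    · right; rfl

lemma pvAOuter_eq_one_iff (numero : Int) :
    ∀ ds : List Int,
      (pvAOuter numero ds = 1 ↔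
        ∃ n ∈ ds, pvAInner numero n (numero.toNat + 1) 0 0 = some 1) := by
  intro ds
  induction ds with
  | nil => simp [pvAOuter]
  | cons n rest ih =>
    rcases pvAInner_cases numero n (numero.toNat + 1) 0 0 with h | h
    · simp [pvAOuter, h]
    · simp [pvAOuter, h, ih]

lemma pvAOuter_zero_or_one (numero : Int) :
    ∀ ds : List Int, pvAOuter numero ds = 0 ∨ pvAOuter numero ds = 1 := by
  intro ds
  induction ds with
  | nil => left; rfl
  | cons n rest ih =>
    rcases pvAInner_cases numero n (numero.toNat + 1) 0 0 with h | h
    · right; simp [pvAOuter, h]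
    · simp [pvAOuter, h]; exact ih

lemma pvA_one_iff (numero : Int) :
    isDigitIncreasing numero = 1 ↔ pvHit numero := by
  unfold isDigitIncreasing
  rw [pvAOuter_eq_one_iff]
  constructor
  · rintro ⟨n, hmem, hsome⟩
    rw [PySem.List.mem_pyRange_one] at hmem
    obtain ⟨k, hkl, hke⟩ := (pvAInner_start numero n (by omega)).mp hsome
    exact ⟨k, by omega, n, by omega, by omega, hke⟩
  · rintro ⟨k, hk1, n, hn1, hn9, hke⟩
    refine ⟨n, ?_, ?_⟩
    · rw [PySem.List.mem_pyRange_one]; omega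
    · exact (pvAInner_start numero n hn1).mpr ⟨k, by omega, hke⟩

-- B side
lemma pvBLoop_characterize (numero : Int) :
    ∀ (fuel j : Nat), 1 ≤ j → numero < pvBas j + fuel →
      (pvBLoop numero fuel (pvRep j) (pvBas j) = 1 ↔
        ∃ k, j ≤ k ∧ ∃ n : Int, 1 ≤ n ∧ n ≤ 9 ∧ n * pvBas k = numero) := by
  intro fuel
  induction fuel with
  | zero =>
    intro j hj hf
    simp only [pvBLoop]
    constructor
    · intro h; exact absurd h (by simp)
    · rintro ⟨k, hk, n, hn1, hn9, hke⟩
      have hbk : pvBas j ≤ pvBas k := pvBas_strictMono.monotone hk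
      have hbk1 : 1 ≤ pvBas k := le_trans (pvBas_pos j hj) hbk
      have : pvBas k ≤ n * pvBas k := le_mul_of_one_le_left (by omega) hn1
      omega
  | succ fuel ih =>
    intro j hj hf
    have hbj : 1 ≤ pvBas j := pvBas_pos j hj
    by_cases hc : pvBas j ≤ numero
    · by_cases hdiv : PySem.Int.mod numero (pvBas j) = 0 ∧
          1 ≤ PySem.Int.floordiv numero (pvBas j) ∧ PySem.Int.floordiv numero (pvBas j) ≤ 9
      · simp only [pvBLoop, if_pos hc, if_pos hdiv, true_iff]
        obtain ⟨hm, hq1, hq9⟩ := hdiv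
        have hid := PySem.Int.floordiv_mul_add_mod numero (pvBas j)
        rw [hm] at hid
        exact ⟨j, le_refl j, PySem.Int.floordiv numero (pvBas j), hq1, hq9, by omega⟩
      · have ht : pvRep j * 10 + 1 = pvRep (j + 1) := by simp only [pvRep]
        have hb : pvBas j + pvRep (j + 1) = pvBas (j + 1) := by simp only [pvBas]
        have hrep1 : 1 ≤ pvRep (j + 1) := by have := pvRep_nonneg j; simp only [pvRep]; omega
        have hf' : numero < pvBas (j + 1) + fuel := by
          have := pvBas_lt_succ j; omega
        have hih := ih (j + 1) (by omega) hf'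
        simp only [pvBLoop, if_pos hc, if_neg hdiv]
        rw [ht, hb, hih]
        constructor
        · rintro ⟨k, hk, hrest⟩; exact ⟨k, by omega, hrest⟩
        · rintro ⟨k, hk, n, hn1, hn9, hke⟩
          refine ⟨k, ?_, n, hn1, hn9, hke⟩
          rcases Nat.lt_or_ge j k with h | h
          · omega
          · exfalso
            have hkj : k = j := by omega
            subst hkj
            -- numero = n * pvBas k is an exact division: the condition would have fired
            apply hdiv
            have hq : PySem.Int.floordiv numero (pvBas k) = n := by
              rw [PySem.Int.floordiv_eq_iff_of_pos (by omega)]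
              constructor
              · omega
              · nlinarith
            have hm : PySem.Int.mod numero (pvBas k) = 0 := by
              have hid := PySem.Int.floordiv_mul_add_mod numero (pvBas k)
              rw [hq] at hid
              omega
            exact ⟨hm, by omega, by omega⟩
    · simp only [pvBLoop, if_neg hc]
      constructor
      · intro h; exact absurd h (by simp)
      · rintro ⟨k, hk, n, hn1, hn9, hke⟩
        have hbk : pvBas j ≤ pvBas k := pvBas_strictMono.monotone hk
        have : pvBas k ≤ n * pvBas k := le_mul_of_one_le_left (by omega) hn1
        omega

lemma pvBLoop_zero_or_one (numero : Int) :
    ∀ (fuel : Nat) (t b : Int),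
      pvBLoop numero fuel t b = 0 ∨ pvBLoop numero fuel t b = 1 := by
  intro fuel
  induction fuel with
  | zero => intro t b; left; rfl
  | succ fuel ih =>
    intro t b
    simp only [pvBLoop]
    split_ifs with h1 h2
    · right; rfl
    · exact ih _ _
    · left; rfl

lemma pvB_one_iff (numero : Int) :
    isDigitIncreasing_alt numero = 1 ↔ pvHit numero := by
  unfold isDigitIncreasing_alt
  have h1 : pvRep 1 = 1 := by simp [pvRep]
  have h2 : pvBas 1 = 1 := by simp [pvBas, pvRep]
  have := pvBLoop_characterize numero (numero.toNat + 1) 1 (le_refl 1) (by rw [h2]; omega)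
  rw [h1, h2] at this
  exact this

-- ===== VERDICT (by name: the statement is the Claim_ definition above) =====
theorem isDigitIncreasing_spec : Claim_equal_isDigitIncreasing := by
  intro numero _
  unfold Spec_isDigitIncreasing
  rcases pvAOuter_zero_or_one numero (PySem.List.pyRange 1 10 1) with hA | hA <;>
  rcases pvBLoop_zero_or_one numero (numero.toNat + 1) 1 1 with hB | hB
  · show pvAOuter numero _ = pvBLoop numero _ 1 1; rw [hA, hB]
  · exfalso
    have hP : pvHit numero := (pvB_one_iff numero).mp hB
    have : isDigitIncreasing numero = 1 := (pvA_one_iff numero).mpr hP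
    unfold isDigitIncreasing at this
    omega
  · exfalso
    have hP : pvHit numero := (pvA_one_iff numero).mp hA
    have : isDigitIncreasing_alt numero = 1 := (pvB_one_iff numero).mpr hP
    unfold isDigitIncreasing_alt at this
    omega
  · show pvAOuter numero _ = pvBLoop numero _ 1 1; rw [hA, hB]
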